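-- pv_equiv track=rewrite | github.com/hans-blok/mandarin-canon | scripts/grondslagen_digest.py | remove_markdown_metadata_block
-- ===== SOURCE A (Python) =====
-- def remove_markdown_metadata_block(body: str) -> str:
--     """Verwijder het Markdown-style metadata blok uit de body.
--
--     Zoekt naar een blok dat begint direct na de titel en eindigt voor ---
--     """
--     # Zoek naar het patroon: titel, lege regel, metadata regels, ---, rest
--     # We willen de metadata regels verwijderen maar de --- en rest behouden
--
--     lines = body.split("\n")
--     new_lines = []
--     in_metadata_block = False
--     found_title = False
--     metadata_ended = False
--
--     for i, line in enumerate(lines):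
--         stripped = line.strip()
--
--         # Check of dit de titel is
--         if not found_title and stripped.startswith("#"):
--             found_title = True
--             new_lines.append(line)
--             continue
--
--         # Na de titel, check voor metadata regels
--         if found_title and not metadata_ended:
--             # Lege regel na titel -> start metadata blok
--             if not in_metadata_block and stripped == "":
--                 in_metadata_block = True
--                 new_lines.append(line)
--                 continue
--
--             # In metadata blok
--             if in_metadata_block:
--                 # --- markeert einde van metadata blok
--                 if stripped == "---":
--                     metadata_ended = True
--                     new_lines.append(line)
--                     continue
--
--                 # Metadata regel (begint met **)
--                 if stripped.startswith("**") and "**:" in stripped: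
--                     # Skip deze regel (verwijder metadata)
--                     continue
--
--                 # Andere content -> einde metadata blok
--                 if stripped and not stripped.startswith("**"):
--                     metadata_ended = True
--
--         new_lines.append(line)
--
--     return "\n".join(new_lines)
-- ===== SOURCE B (Python) =====
-- def _scrub_block(block):
--     """Process the metadata-block region: drop '**key**: value' lines, stop at the
--     terminating line (kept), keep blanks and bare '**bold**' lines."""
--     kept = []
--     j = 0
--     while j < len(block):
--         st = block[j].strip()
--         if st.startswith("**") and "**:" in st:
--             j += 1
--             continue
--         kept.append(block[j])
--         j += 1
--         if st == "---" or (st != "" and not st.startswith("**")):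
--             break
--     kept.extend(block[j:])
--     return kept
--
--
-- def remove_markdown_metadata_block(body: str) -> str:
--     lines = body.split("\n")
--     t = next((i for i, ln in enumerate(lines) if ln.strip().startswith("#")), None)
--     if t is not None:
--         k = next((j for j, ln in enumerate(lines[t + 1:]) if ln.strip() == ""), None)
--         if k is not None:
--             s = t + 1 + k
--             lines = lines[:s + 1] + _scrub_block(lines[s + 1:])
--     return "\n".join(lines)
-- ===== Notes on version B (the rewrite author's own statement) =====
-- stated objective: alternative
-- what changed: Replaces A's single flag-driven loop (found_title/in_metadata_block/metadata_ended state machine) by a boundary-first decomposition: find the title index, find the first blank line after it, scrub only the block region with an early-exit loop, and keep the prefix and tail untouched.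
import Mathlib
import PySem

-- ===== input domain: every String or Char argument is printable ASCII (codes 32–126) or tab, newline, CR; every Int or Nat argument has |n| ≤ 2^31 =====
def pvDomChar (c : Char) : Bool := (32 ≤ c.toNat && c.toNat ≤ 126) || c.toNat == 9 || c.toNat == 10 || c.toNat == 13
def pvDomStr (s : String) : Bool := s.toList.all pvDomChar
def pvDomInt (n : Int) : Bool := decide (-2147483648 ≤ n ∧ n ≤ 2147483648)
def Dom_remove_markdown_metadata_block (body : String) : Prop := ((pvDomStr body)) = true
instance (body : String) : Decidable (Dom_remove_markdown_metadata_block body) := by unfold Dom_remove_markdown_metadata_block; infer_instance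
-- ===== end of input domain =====

-- B replaces A's single flag-driven loop by a boundary-first decomposition (find the title,
-- find the blank line opening the block, scrub only the block region); objective: simpler, same cost.

-- ===== PORT A =====
-- body.split("\n"): the separator is the non-empty literal "\n", so Str.split? is always `some`;
-- .getD [] only unwraps the option (it is never taken).
def pvSplitLines (body : String) : List String := (PySem.Str.split? body "\n").getD []

-- the for-loop of A: state = (new_lines accumulator, found_title, in_metadata_block, metadata_ended)
def pvLoopA : List String → List String → Bool → Bool → Bool → List String
  | [], acc, _, _, _ => acc
  | line :: rest, acc, foundTitle, inBlock, ended =>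
    let stripped := PySem.Str.strip line
    if !foundTitle && PySem.Str.startswith stripped "#" then
      pvLoopA rest (acc ++ [line]) true inBlock ended
    else if foundTitle && !ended then
      if !inBlock && stripped == "" then
        pvLoopA rest (acc ++ [line]) foundTitle true ended
      else if inBlock then
        if stripped == "---" then
          pvLoopA rest (acc ++ [line]) foundTitle inBlock true
        else if PySem.Str.startswith stripped "**" && PySem.Str.isIn "**:" stripped then
          pvLoopA rest acc foundTitle inBlock ended   -- skip (remove metadata line)
        else if stripped ≠ "" && !PySem.Str.startswith stripped "**" then
          pvLoopA rest (acc ++ [line]) foundTitle inBlock true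
        else
          pvLoopA rest (acc ++ [line]) foundTitle inBlock ended
      else
        pvLoopA rest (acc ++ [line]) foundTitle inBlock ended
    else
      pvLoopA rest (acc ++ [line]) foundTitle inBlock ended

def remove_markdown_metadata_block (body : String) : String :=
  let lines := pvSplitLines body
  PySem.Str.join "\n" (pvLoopA lines [] false false false)

-- ===== PORT B =====
def pvIsTitle (l : String) : Bool := PySem.Str.startswith (PySem.Str.strip l) "#"
def pvIsBlank (l : String) : Bool := PySem.Str.strip l == ""
def pvIsMeta (st : String) : Bool := PySem.Str.startswith st "**" && PySem.Str.isIn "**:" st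
def pvIsStop (st : String) : Bool := st == "---" || (st ≠ "" && !PySem.Str.startswith st "**")

-- next((i for i, ln in enumerate(xs) if p(ln)), None)
def pvFindIdx (p : String → Bool) : List String → Option Nat
  | [] => none
  | l :: ls => if p l then some 0 else (pvFindIdx p ls).map (· + 1)

-- _scrub_block: drop metadata lines, stop (keeping the line) at the terminator, keep the tail
def pvScrub : List String → List String
  | [] => []
  | l :: ls =>
    let st := PySem.Str.strip l
    if pvIsMeta st then pvScrub ls
    else if pvIsStop st then l :: ls
    else l :: pvScrub ls

def remove_markdown_metadata_block_alt (body : String) : String :=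
  let lines := pvSplitLines body
  let lines' :=
    match pvFindIdx pvIsTitle lines with
    | none => lines
    | some t =>
      match pvFindIdx pvIsBlank (lines.drop (t + 1)) with
      | none => lines
      | some k =>
        lines.take (t + 1 + k + 1) ++ pvScrub (lines.drop (t + 1 + k + 1))
  PySem.Str.join "\n" lines'

-- ===== PRECONDITION & SPEC =====
def Spec_remove_markdown_metadata_block (body : String) (out : String) : Prop := out = remove_markdown_metadata_block_alt body
instance (body : String) (out : String) : Decidable (Spec_remove_markdown_metadata_block body out) := by unfold Spec_remove_markdown_metadata_block; infer_instance

-- ===== CLAIM (what is proved, stated in full; the proofs are below) =====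
def Claim_equal_remove_markdown_metadata_block : Prop := ∀ (body : String), Dom_remove_markdown_metadata_block body → Spec_remove_markdown_metadata_block body (remove_markdown_metadata_block body)

-- ===== LEMMAS AND PROOFS =====

-- the accumulator only prefixes the result
theorem pvLoopA_append (ls : List String) : ∀ (a₁ a₂ : List String) (f b e : Bool),
    pvLoopA ls (a₁ ++ a₂) f b e = a₁ ++ pvLoopA ls a₂ f b e := by
  induction ls with
  | nil => intro a₁ a₂ f b e; rfl
  | cons l rest ih =>
    intro a₁ a₂ f b e
    simp only [pvLoopA]
    split_ifs <;> (try simp only [List.append_assoc]) <;> apply ih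

theorem pvLoopA_cons (ls : List String) (l : String) (f b e : Bool) :
    pvLoopA ls [l] f b e = l :: pvLoopA ls [] f b e := by
  simpa using pvLoopA_append ls [l] [] f b e

-- once metadata_ended, every remaining line is appended unchanged
theorem pvLoopA_ended (ls : List String) : ∀ (b : Bool), pvLoopA ls [] true b true = ls := by
  induction ls with
  | nil => intro b; simp [pvLoopA]
  | cons l rest ih => intro b; simp [pvLoopA, pvLoopA_cons, ih]

-- inside the metadata block, A's loop computes exactly B's scrub
theorem pvLoopA_block (ls : List String) : pvLoopA ls [] true true false = pvScrub ls := by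
  induction ls with
  | nil => simp [pvLoopA, pvScrub]
  | cons l rest ih =>
    by_cases hw : PySem.Chars.startswith (PySem.Chars.strip l.toList) ['*', '*']
    · have hs' : (PySem.Str.strip l == "---") = false := by
        rcases eq_or_ne (PySem.Str.strip l) "---" with h | h
        · have h2 := congrArg String.toList h
          rw [PySem.Str.toList_strip] at h2
          rw [h2] at hw
          exact absurd hw (by decide)
        · simp [h]
      have he : PySem.Str.strip l ≠ "" := by
        intro h
        have h2 := congrArg String.toList h
        rw [PySem.Str.toList_strip] at h2
        rw [h2] at hw
        exact absurd hw (by decide)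
      by_cases hin : PySem.Chars.isIn ['*', '*', ':'] (PySem.Chars.strip l.toList)
      · simp [pvLoopA, pvScrub, pvIsMeta, ih, hw, hin, hs']
      · have hin' : PySem.Chars.isIn ['*', '*', ':'] (PySem.Chars.strip l.toList) = false := by
          simpa using hin
        simp [pvLoopA, pvScrub, pvIsMeta, pvIsStop, pvLoopA_cons, ih, hw, hin', hs', he]
    · have hw' : PySem.Chars.startswith (PySem.Chars.strip l.toList) ['*', '*'] = false := by
        simpa using hw
      by_cases he : PySem.Str.strip l = ""
      · simp [pvLoopA, pvScrub, pvIsMeta, pvIsStop, pvLoopA_cons, ih, he]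
      · by_cases hs : PySem.Str.strip l = "---"
        · simp [pvLoopA, pvScrub, pvIsMeta, pvIsStop, pvLoopA_cons, pvLoopA_ended, hs,
                (by decide : PySem.Chars.startswith ['-', '-', '-'] ['*', '*'] = false)]
        · simp [pvLoopA, pvScrub, pvIsMeta, pvIsStop, pvLoopA_cons, pvLoopA_ended, hw', he, hs]

-- after the title and before the first blank line, A keeps every line; the blank line opens the block
theorem pvLoopA_seek_blank (ls : List String) :
    pvLoopA ls [] true false false =
      match pvFindIdx pvIsBlank ls with
      | none => ls
      | some k => ls.take (k + 1) ++ pvScrub (ls.drop (k + 1)) := by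
  induction ls with
  | nil => simp [pvLoopA, pvFindIdx]
  | cons l rest ih =>
    by_cases hb : PySem.Str.strip l = ""
    · simp [pvLoopA, pvFindIdx, pvIsBlank, pvLoopA_cons, pvLoopA_block, hb]
    · rw [show pvLoopA (l :: rest) [] true false false
            = l :: pvLoopA rest [] true false false by
          simp [pvLoopA, pvLoopA_cons, hb], ih]
      cases h : pvFindIdx pvIsBlank rest with
      | none => simp [pvFindIdx, pvIsBlank, hb, h]
      | some k => simp [pvFindIdx, pvIsBlank, hb, h]

-- before the title, A keeps every line; the title line switches phases
theorem pvLoopA_main (ls : List String) :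
    pvLoopA ls [] false false false =
      match pvFindIdx pvIsTitle ls with
      | none => ls
      | some t =>
        match pvFindIdx pvIsBlank (ls.drop (t + 1)) with
        | none => ls
        | some k => ls.take (t + 1 + k + 1) ++ pvScrub (ls.drop (t + 1 + k + 1)) := by
  induction ls with
  | nil => simp [pvLoopA, pvFindIdx]
  | cons l rest ih =>
    by_cases ht : pvIsTitle l
    · have ht' : PySem.Chars.startswith (PySem.Chars.strip l.toList) ['#'] = true := by
        simpa [pvIsTitle] using ht
      rw [show pvLoopA (l :: rest) [] false false false
            = l :: pvLoopA rest [] true false false by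
          simp [pvLoopA, pvLoopA_cons, ht'], pvLoopA_seek_blank]
      cases h : pvFindIdx pvIsBlank rest with
      | none => simp [pvFindIdx, ht, h]
      | some k =>
        simp [pvFindIdx, ht, h, List.take_succ_cons, List.drop_succ_cons]
        rw [Nat.add_comm 1 k]
    · have ht' : PySem.Chars.startswith (PySem.Chars.strip l.toList) ['#'] = false := by
        simpa [pvIsTitle] using ht
      rw [show pvLoopA (l :: rest) [] false false false
            = l :: pvLoopA rest [] false false false by
          simp [pvLoopA, pvLoopA_cons, ht'], ih]
      cases h : pvFindIdx pvIsTitle rest with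
      | none => simp [pvFindIdx, ht, h]
      | some t =>
        simp only [pvFindIdx, ht, Bool.false_eq_true, if_false, h, Option.map_some]
        have h1 : (l :: rest).drop (t + 1 + 1) = rest.drop (t + 1) := by simp
        rw [h1]
        cases h2 : pvFindIdx pvIsBlank (rest.drop (t + 1)) with
        | none => simp
        | some k =>
          have h3 : t + 1 + 1 + k + 1 = (t + 1 + k + 1) + 1 := by omega
          simp [h3, List.take_succ_cons, List.drop_succ_cons]

-- ===== VERDICT (by name: the statement is the Claim_ definition above) =====
theorem remove_markdown_metadata_block_spec : Claim_equal_remove_markdown_metadata_block := by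
  intro body _
  unfold Spec_remove_markdown_metadata_block
  unfold remove_markdown_metadata_block remove_markdown_metadata_block_alt
  exact congrArg (PySem.Str.join "\n") (pvLoopA_main (pvSplitLines body))
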